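-- pv_equiv track=rewrite | github.com/sainathGit/breast_cancer_detection | segTools.py | classify_cells
-- ===== SOURCE A (Python) =====
-- def is_mitotic(blob, m_cell_blobs):
--     for pixel in [(y,x) for x,y in blob]:
--         for m_cell_blob in m_cell_blobs:
--             if pixel in m_cell_blob:
--                 return True
--     return False
--
-- def classify_cells(blobs, m_cell_blobs):
--     detected_mcells = []
--     non_mitotic = []
--     for i, blob in enumerate(blobs):
--         if is_mitotic(blob, m_cell_blobs):
--             detected_mcells.append(i)
--         else:
--             non_mitotic.append(i)
--     return detected_mcells, non_mitotic
-- ===== SOURCE B (Python) =====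
-- def classify_cells(blobs, m_cell_blobs):
--     # Inverted index: pixel (y, x) -> list of blob indices containing it.
--     index = {}
--     for i, blob in enumerate(blobs):
--         for x, y in blob:
--             index.setdefault((y, x), []).append(i)
--     # One reverse pass: look each mitotic-cell pixel up in the index.
--     mitotic = set()
--     for m_cell_blob in m_cell_blobs:
--         for pixel in m_cell_blob:
--             mitotic.update(index.get(pixel, []))
--     detected_mcells = []
--     non_mitotic = []
--     for i in range(len(blobs)):
--         if i in mitotic:
--             detected_mcells.append(i)
--         else:
--             non_mitotic.append(i)
--     return detected_mcells, non_mitotic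
-- ===== Notes on version B (the rewrite author's own statement) =====
-- stated objective: alternative
-- what changed: Replaces A's per-blob rescan of every m_cell_blob (list membership inside nested loops with early return) with a one-pass inverted index from pixel to blob indices plus a single reverse pass over the m_cell pixels collecting mitotic indices in a set.
import Mathlib
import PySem

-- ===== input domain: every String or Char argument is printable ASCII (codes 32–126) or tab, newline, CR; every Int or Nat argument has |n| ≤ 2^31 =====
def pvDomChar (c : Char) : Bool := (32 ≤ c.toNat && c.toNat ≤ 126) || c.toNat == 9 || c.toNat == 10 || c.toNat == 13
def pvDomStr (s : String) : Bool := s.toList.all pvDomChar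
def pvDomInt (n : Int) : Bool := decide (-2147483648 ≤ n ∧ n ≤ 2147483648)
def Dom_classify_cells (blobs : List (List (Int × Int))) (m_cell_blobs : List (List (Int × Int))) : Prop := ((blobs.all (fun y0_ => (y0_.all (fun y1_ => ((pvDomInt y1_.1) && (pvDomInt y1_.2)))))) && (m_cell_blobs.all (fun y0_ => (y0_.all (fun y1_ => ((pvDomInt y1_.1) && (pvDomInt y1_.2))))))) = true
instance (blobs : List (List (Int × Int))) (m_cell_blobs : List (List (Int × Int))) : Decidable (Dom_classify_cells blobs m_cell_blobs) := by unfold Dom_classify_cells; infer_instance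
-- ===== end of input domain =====

-- B replaces A's per-blob rescan of all m_cell_blobs with an inverted pixel→blob-index table
-- and a single reverse pass over the m_cell pixels (objective: alternative algorithm, same result).

-- ===== PORT A =====
-- A's is_mitotic: for pixel in [(y,x) for x,y in blob]: for m in m_cell_blobs: if pixel in m: return True
def is_mitotic (blob : List (Int × Int)) (m_cell_blobs : List (List (Int × Int))) : Bool :=
  (blob.map (fun q => (q.2, q.1))).any (fun pixel =>
    m_cell_blobs.any (fun m_cell_blob => m_cell_blob.contains pixel))

def classify_cells (blobs : List (List (Int × Int))) (m_cell_blobs : List (List (Int × Int))) : List Int × List Int :=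
  (PySem.List.enumerate blobs).foldl (fun acc ib =>
      if is_mitotic ib.2 m_cell_blobs then (acc.1 ++ [ib.1], acc.2)
      else (acc.1, acc.2 ++ [ib.1]))
    ([], [])

-- ===== PORT B =====
def classify_cells_alt (blobs : List (List (Int × Int))) (m_cell_blobs : List (List (Int × Int))) : List Int × List Int :=
  -- index.setdefault((y, x), []).append(i)
  let index : PySem.Dict (Int × Int) (List Int) :=
    (PySem.List.enumerate blobs).foldl (fun d ib =>
      ib.2.foldl (fun d q => d.modify (q.2, q.1) [] (· ++ [ib.1])) d) PySem.Dict.empty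
  -- mitotic.update(index.get(pixel, []))
  let mitotic : PySem.Set Int :=
    m_cell_blobs.foldl (fun s m_cell_blob =>
      m_cell_blob.foldl (fun s pixel => PySem.Set.update s (index.getD pixel [])) s) PySem.Set.empty
  (PySem.List.pyRange 0 blobs.length 1).foldl (fun acc i =>
      if PySem.Set.contains mitotic i then (acc.1 ++ [i], acc.2)
      else (acc.1, acc.2 ++ [i]))
    ([], [])

-- ===== PRECONDITION & SPEC =====
def Spec_classify_cells (blobs : List (List (Int × Int))) (m_cell_blobs : List (List (Int × Int))) (out : List Int × List Int) : Prop := out = classify_cells_alt blobs m_cell_blobs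
instance (blobs : List (List (Int × Int))) (m_cell_blobs : List (List (Int × Int))) (out : List Int × List Int) : Decidable (Spec_classify_cells blobs m_cell_blobs out) := by unfold Spec_classify_cells; infer_instance

-- ===== CLAIM (what is proved, stated in full; the proofs are below) =====
def Claim_equal_classify_cells : Prop := ∀ (blobs : List (List (Int × Int))) (m_cell_blobs : List (List (Int × Int))), Dom_classify_cells blobs m_cell_blobs → Spec_classify_cells blobs m_cell_blobs (classify_cells blobs m_cell_blobs)

-- ===== LEMMAS AND PROOFS =====

-- a two-list partition loop: 'if c(x): out1.append(f x) else: out2.append(f x)'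
theorem foldl_partition {α : Type} (c : α → Bool) (f : α → Int) (l : List α)
    (init : List Int × List Int) :
    l.foldl (fun acc x => if c x then (acc.1 ++ [f x], acc.2) else (acc.1, acc.2 ++ [f x])) init
      = (init.1 ++ (l.filter c).map f, init.2 ++ (l.filter (fun x => !c x)).map f) := by
  induction l generalizing init with
  | nil => simp
  | cons x xs ih =>
    by_cases h : c x = true <;> simp [List.foldl_cons, h, ih]

-- nested foldl over a list of lists = foldl over the flattening
theorem foldl_nested {α β σ : Type} (g : α → List β) (step : σ → β → σ)
    (l : List α) (s : σ) :
    l.foldl (fun s a => (g a).foldl step s) s = (l.flatMap g).foldl step s := by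
  induction l generalizing s with
  | nil => rfl
  | cons a l ih => simp [List.flatMap_cons, List.foldl_append, ih]

-- membership in a set built by repeated update
theorem mem_foldl_update {α β : Type} [BEq α] [LawfulBEq α] (f : β → List α)
    (l : List β) (s : PySem.Set α) (x : α) :
    x ∈ l.foldl (fun s b => PySem.Set.update s (f b)) s ↔ x ∈ s ∨ ∃ b ∈ l, x ∈ f b := by
  induction l generalizing s with
  | nil => simp
  | cons b l ih => simp [ih, PySem.Set.mem_update, or_assoc]

-- characterisation of B's inverted index
theorem getD_index (blobs : List (List (Int × Int))) (p : Int × Int) :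
    ((PySem.List.enumerate blobs).foldl (fun d ib =>
        ib.2.foldl (fun d q => d.modify (q.2, q.1) [] (· ++ [ib.1])) d) PySem.Dict.empty).getD p []
      = (((PySem.List.enumerate blobs).flatMap (fun ib =>
            ib.2.map (fun q => ((q.2, q.1), ib.1)))).filter (fun e => e.1 == p)).map (·.2) := by
  have h1 : ∀ (ib : Int × List (Int × Int)) (d : PySem.Dict (Int × Int) (List Int)),
      ib.2.foldl (fun d q => d.modify (q.2, q.1) [] (· ++ [ib.1])) d
        = (ib.2.map (fun q => ((q.2, q.1), ib.1))).foldl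
            (fun d e => d.modify e.1 [] (· ++ [e.2])) d := by
    intro ib d; rw [List.foldl_map]
  have h2 : (PySem.List.enumerate blobs).foldl (fun d ib =>
        ib.2.foldl (fun d q => d.modify (q.2, q.1) [] (· ++ [ib.1])) d) PySem.Dict.empty
      = ((PySem.List.enumerate blobs).flatMap (fun ib =>
          ib.2.map (fun q => ((q.2, q.1), ib.1)))).foldl
            (fun d e => d.modify e.1 [] (· ++ [e.2])) PySem.Dict.empty := by
    rw [← foldl_nested]
    apply PySem.List.foldl_congr_mem
    intro d ib _; exact h1 ib d
  rw [h2, PySem.Dict.getD_foldl_modify_append]; simp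

-- membership in B's mitotic set, via the flattened m_cell pixels
theorem mem_mitotic (idx : PySem.Dict (Int × Int) (List Int))
    (m_cell_blobs : List (List (Int × Int))) (x : Int) :
    x ∈ m_cell_blobs.foldl (fun s m_cell_blob =>
        m_cell_blob.foldl (fun s pixel => PySem.Set.update s (idx.getD pixel [])) s)
        PySem.Set.empty
      ↔ ∃ mb ∈ m_cell_blobs, ∃ p ∈ mb, x ∈ idx.getD p [] := by
  rw [foldl_nested (g := fun mb => mb)
    (step := fun s pixel => PySem.Set.update s (idx.getD pixel []))]
  rw [mem_foldl_update]
  simp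
  tauto

-- the pointwise agreement of the two classification tests
theorem test_agree (blobs : List (List (Int × Int))) (m_cell_blobs : List (List (Int × Int)))
    (k : Nat) (hk : k < blobs.length) :
    PySem.Set.contains
      (m_cell_blobs.foldl (fun s m_cell_blob =>
        m_cell_blob.foldl (fun s pixel => PySem.Set.update s
          (((PySem.List.enumerate blobs).foldl (fun d ib =>
              ib.2.foldl (fun d q => d.modify (q.2, q.1) [] (· ++ [ib.1])) d)
            PySem.Dict.empty).getD pixel [])) s) PySem.Set.empty) (k : Int)
      = is_mitotic blobs[k] m_cell_blobs := by
  rw [Bool.eq_iff_iff]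
  rw [PySem.Set.contains_iff]
  rw [mem_mitotic]
  simp only [getD_index]
  simp [is_mitotic, List.any_eq_true, List.mem_filter,
    PySem.List.mem_enumerate_iff, List.mem_map]
  constructor
  · rintro ⟨mb, hmb, a, b, hab, hx, h2⟩
    exact ⟨b, a, h2, mb, hmb, hab⟩
  · rintro ⟨a, b, hab, mb, hmb, h2⟩
    exact ⟨mb, hmb, b, a, h2, hk, hab⟩

-- ===== VERDICT (by name: the statement is the Claim_ definition above) =====
theorem classify_cells_spec : Claim_equal_classify_cells := by
  intro blobs m_cell_blobs _
  unfold Spec_classify_cells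
  simp only [classify_cells, classify_cells_alt]
  have hA := foldl_partition (fun ib : Int × List (Int × Int) => is_mitotic ib.2 m_cell_blobs)
    (·.1) (PySem.List.enumerate blobs) ([], [])
  have hB := foldl_partition (fun i => PySem.Set.contains
      (m_cell_blobs.foldl (fun s m_cell_blob =>
        m_cell_blob.foldl (fun s pixel => PySem.Set.update s
          (((PySem.List.enumerate blobs).foldl (fun d ib =>
              ib.2.foldl (fun d q => d.modify (q.2, q.1) [] (· ++ [ib.1])) d)
            PySem.Dict.empty).getD pixel [])) s) PySem.Set.empty) i)
    (fun i => i) (PySem.List.pyRange 0 (blobs.length : Int) 1) ([], [])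
  simp only [] at hA hB
  rw [hA, hB]
  have hR : PySem.List.pyRange 0 (blobs.length : Int) 1
      = (PySem.List.enumerate blobs).map (·.1) := by
    rw [PySem.List.map_fst_enumerate]; norm_num
  rw [hR, List.filter_map, List.filter_map]
  have key : ∀ ib ∈ PySem.List.enumerate blobs,
      is_mitotic ib.2 m_cell_blobs = PySem.Set.contains
      (m_cell_blobs.foldl (fun s m_cell_blob =>
        m_cell_blob.foldl (fun s pixel => PySem.Set.update s
          (((PySem.List.enumerate blobs).foldl (fun d ib =>
              ib.2.foldl (fun d q => d.modify (q.2, q.1) [] (· ++ [ib.1])) d)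
            PySem.Dict.empty).getD pixel [])) s) PySem.Set.empty) ib.1 := by
    intro ib hib
    rw [PySem.List.mem_enumerate_iff] at hib
    obtain ⟨j, hj, rfl⟩ := hib
    simp only [zero_add]
    exact (test_agree blobs m_cell_blobs j hj).symm
  simp only [List.nil_append, Prod.mk.injEq]
  constructor
  · rw [List.filter_congr key]
    simp [Function.comp_def]
  · rw [List.filter_congr (q := fun ib => !PySem.Set.contains _ ib.1)
      (by intro ib hib; rw [key ib hib])]
    simp [Function.comp_def]
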